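-- pv_equiv track=rewrite | github.com/mixmikmic/GH_code_analysis | python/playing with generator of cnfs.py | gen_all_clauses
-- ===== SOURCE A (Python) =====
-- def gen_all_clauses(k, n):
--     if k == 0:
--         yield tuple()
--     else:
--         for clause in gen_all_clauses(k-1, n):
--             for var in range(1, n+1):
--                 for svar in [var, -var]:
--                     yield clause + (svar,)
-- ===== SOURCE B (Python) =====
-- def gen_all_clauses(k, n):
--     # iterative cartesian power of the literal alphabet [1,-1,2,-2,...,n,-n]
--     literals = [s * v for v in range(1, n + 1) for s in (1, -1)]
--     out = [()]
--     for _ in range(k):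
--         out = [(x,) + t for x in literals for t in out]
--     yield from out
-- ===== Notes on version B (the rewrite author's own statement) =====
-- stated objective: idiomatic
-- what changed: Replaces the k-level recursion that appends a literal to each shorter clause with a flat literal alphabet built once and an iterative Cartesian-power loop that prepends coordinates, building tuples front-first.
import Mathlib
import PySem

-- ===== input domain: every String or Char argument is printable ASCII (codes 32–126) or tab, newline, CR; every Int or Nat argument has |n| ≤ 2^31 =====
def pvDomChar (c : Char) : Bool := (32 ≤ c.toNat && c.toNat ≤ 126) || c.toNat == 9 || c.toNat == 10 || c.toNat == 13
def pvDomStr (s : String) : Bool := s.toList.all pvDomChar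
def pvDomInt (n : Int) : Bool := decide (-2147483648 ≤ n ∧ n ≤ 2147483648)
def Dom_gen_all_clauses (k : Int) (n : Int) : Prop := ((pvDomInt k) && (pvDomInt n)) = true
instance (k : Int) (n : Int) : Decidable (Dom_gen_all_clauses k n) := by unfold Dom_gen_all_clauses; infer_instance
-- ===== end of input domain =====

-- B builds the literal alphabet once and takes its Cartesian k-th power with one
-- iterative loop (prepending coordinates), instead of A's k-level recursion that
-- appends a literal to every shorter clause. Objective: idiomatic.


-- ===== PORT A =====
-- A's recursion on k, with the non-negative k as Nat fuel (Pre_ requires 0 ≤ k;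
-- for k < 0 the Python recursion never terminates).
def genAGo (m : Nat) (n : Int) : List (List Int) :=
  match m with
  | 0 => [[]]
  | Nat.succ m' =>
      (genAGo m' n).flatMap (fun clause =>
        (PySem.List.pyRange 1 (n + 1) 1).flatMap (fun var =>
          [var, -var].map (fun svar => clause ++ [svar])))

-- for k < 0 Python A never returns (infinite recursion); the port returns [] there,
-- outside Pre_ (nothing is claimed about it)
def gen_all_clauses (k : Int) (n : Int) : List (List Int) :=
  if k < 0 then [] else genAGo k.toNat n

-- ===== PORT B =====
-- literals = [s*v for v in range(1, n+1) for s in (1, -1)]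
def pvLits (n : Int) : List Int :=
  (PySem.List.pyRange 1 (n + 1) 1).flatMap (fun v => [(1 : Int), -1].map (fun s => s * v))

def gen_all_clauses_alt (k : Int) (n : Int) : List (List Int) :=
  (List.range k.toNat).foldl
    (fun out _ => (pvLits n).flatMap (fun x => out.map (fun t => x :: t))) [[]]

-- ===== PRECONDITION & SPEC =====
-- Pre_ excludes k < 0, where the Python A recurses forever (RecursionError).
def Pre_gen_all_clauses (k : Int) (n : Int) : Prop := 0 ≤ k
instance (k : Int) (n : Int) : Decidable (Pre_gen_all_clauses k n) := by unfold Pre_gen_all_clauses; infer_instance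
def pvWitness_gen_all_clauses : Int × Int := (2, 2)

def Spec_gen_all_clauses (k : Int) (n : Int) (out : List (List Int)) : Prop := out = gen_all_clauses_alt k n
instance (k : Int) (n : Int) (out : List (List Int)) : Decidable (Spec_gen_all_clauses k n out) := by unfold Spec_gen_all_clauses; infer_instance

-- ===== CLAIM (what is proved, stated in full; the proofs are below) =====
def Claim_equal_gen_all_clauses : Prop := ∀ (k : Int) (n : Int), Dom_gen_all_clauses k n → Pre_gen_all_clauses k n → Spec_gen_all_clauses k n (gen_all_clauses k n)

-- ===== LEMMAS AND PROOFS =====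

-- A's step in terms of B's flat alphabet (snoc form).
lemma genAGo_succ (m : Nat) (n : Int) :
    genAGo (m + 1) n = (genAGo m n).flatMap (fun c => (pvLits n).map (fun x => c ++ [x])) := by
  simp [genAGo, pvLits, List.flatMap_def, List.map_map, Function.comp_def]

-- prepend step and snoc step commute
lemma step_exchange (L : List Int) (X : List (List Int)) :
    L.flatMap (fun x => (X.flatMap (fun c => L.map (fun y => c ++ [y]))).map (fun t => x :: t))
      = (L.flatMap (fun x => X.map (fun t => x :: t))).flatMap (fun c => L.map (fun y => c ++ [y])) := by
  simp [List.flatMap_def, List.map_map, List.flatten_flatten, Function.comp_def]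

-- cons-form step applied to genAGo m equals genAGo (m+1)
lemma step_eq (n : Int) : ∀ m : Nat,
    (pvLits n).flatMap (fun x => (genAGo m n).map (fun t => x :: t)) = genAGo (m + 1) n := by
  intro m
  induction m with
  | zero => simp [genAGo, pvLits, List.flatMap_def, List.map_map, List.flatten_flatten, Function.comp_def]
  | succ m ih =>
      rw [genAGo_succ m n, step_exchange, ih, genAGo_succ (m + 1) n]

lemma fold_eq (n : Int) : ∀ m : Nat,
    (List.range m).foldl
      (fun out _ => (pvLits n).flatMap (fun x => out.map (fun t => x :: t))) [[]] = genAGo m n := by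
  intro m
  induction m with
  | zero => simp [genAGo]
  | succ m ih => rw [List.range_succ, List.foldl_append, ih, List.foldl_cons, List.foldl_nil, step_eq]

-- ===== VERDICT (by name: the statement is the Claim_ definition above) =====
theorem gen_all_clauses_spec : Claim_equal_gen_all_clauses := by
  intro k n _ hk
  unfold Pre_gen_all_clauses at hk
  unfold Spec_gen_all_clauses gen_all_clauses gen_all_clauses_alt
  rw [if_neg (by omega : ¬ k < 0)]
  exact (fold_eq n k.toNat).symm
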